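-- pv_equiv track=rewrite | github.com/DLibatique/latin-inflection | conjugation.py | pres_conj
-- ===== SOURCE A (Python) =====
-- def pres_conj(verb, conj, passive=False):
--
--     # ending groups
--     pres_act = ['o','s','t','mus','tis','nt']
--     pres_pass = ['r', 'ris', 'tur', 'mur', 'mini', 'ntur']
--
--     # 1st and 2nd conjugation
--     if conj in ['1', '2']: # if conj == '1' or conj == '2':
--         if not passive: # if passive == False:
--             conjugated_verbs = [verb[0]] + [verb[1][:-2] + x for x in pres_act[1:]]
--         else: # elif passive == True:
--             conjugated_verbs = [verb[0] + pres_pass[0]] + [verb[1][:-2] + x for x in pres_pass[1:]]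
--
--     # 3rd conj
--     elif conj == '3':
--         if not passive: # if passive == False:
--             conjugated_verbs = [verb[0]] + [verb[1][:-3] + 'i' + x for x in pres_act[1:5]] + [verb[1][:-3] + 'u' + pres_act[5]]
--         else: # elif passive == True:
--             conjugated_verbs = [verb[0] + pres_pass[0]] + [verb[1][:-3] + 'e' + pres_pass[1]] + [verb[1][:-3] + 'i' + x for x in pres_pass[2:5]] + [verb[1][:-3] + 'u' + pres_pass[5]]
--
--     # 3rd io
--     elif conj == '3io':
--         if not passive: # if passive == False:
--             conjugated_verbs = [verb[0]] + [verb[1][:-3] + 'i' + x for x in pres_act[1:5]] + [verb[1][:-3] + 'iu' + pres_act[5]]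
--         else: # elif passive == True:
--             conjugated_verbs = [verb[0] + pres_pass[0]] + [verb[1][:-3] + 'e' + pres_pass[1]] + [verb[1][:-3] + 'i' + x for x in pres_pass[2:5]] + [verb[1][:-3] + 'iu' + pres_pass[5]]
--
--     # 4th
--     elif conj == '4':
--         if not passive: # if passive == False:
--             conjugated_verbs = [verb[0]] + [verb[1][:-2] + x for x in pres_act[1:5]] + [verb[1][:-2] + 'u' + pres_act[5]]
--         else: # elif passive == True:
--             conjugated_verbs = [verb[0] + pres_pass[0]] + [verb[1][:-2] + x for x in pres_pass[1:5]] + [verb[1][:-2] + 'u' + pres_pass[5]]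
--
--     return conjugated_verbs
-- ===== SOURCE B (Python) =====
-- def pres_conj(verb, conj, passive=False):
--     # per-conjugation descriptor: (chars sliced off verb[1], per-position
--     # infix for active forms, per-position infix for passive forms)
--     if conj in ('1', '2'):
--         spec = (2, [''] * 6, [''] * 6)
--     elif conj == '3':
--         spec = (3, ['', 'i', 'i', 'i', 'i', 'u'], ['', 'e', 'i', 'i', 'i', 'u'])
--     elif conj == '3io':
--         spec = (3, ['', 'i', 'i', 'i', 'i', 'iu'], ['', 'e', 'i', 'i', 'i', 'iu'])
--     elif conj == '4':
--         spec = (2, ['', '', '', '', '', 'u'], ['', '', '', '', '', 'u'])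
--     cut, act_inf, pass_inf = spec  # unknown conj: UnboundLocalError, like A
--     endings = ['r', 'ris', 'tur', 'mur', 'mini', 'ntur'] if passive else ['o', 's', 't', 'mus', 'tis', 'nt']
--     infixes = pass_inf if passive else act_inf
--     stem = verb[1][:-cut]
--     return [verb[0] + ('r' if passive else '') if i == 0 else stem + infixes[i] + e
--             for i, e in enumerate(endings)]
-- ===== Notes on version B (the rewrite author's own statement) =====
-- stated objective: simpler
-- what changed: Replaces the eight branch-specific list-comprehension blocks with a small per-conjugation descriptor (slice amount + per-position infix tables) consumed by one uniform enumerate loop over the six endings.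
-- outside the precondition, e.g. on pres_conj(['a', 'b'], '5', False): A raises UnboundLocalError, B raises UnboundLocalError; on pres_conj(['a'], '1', False): A raises IndexError, B raises IndexError
import Mathlib
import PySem

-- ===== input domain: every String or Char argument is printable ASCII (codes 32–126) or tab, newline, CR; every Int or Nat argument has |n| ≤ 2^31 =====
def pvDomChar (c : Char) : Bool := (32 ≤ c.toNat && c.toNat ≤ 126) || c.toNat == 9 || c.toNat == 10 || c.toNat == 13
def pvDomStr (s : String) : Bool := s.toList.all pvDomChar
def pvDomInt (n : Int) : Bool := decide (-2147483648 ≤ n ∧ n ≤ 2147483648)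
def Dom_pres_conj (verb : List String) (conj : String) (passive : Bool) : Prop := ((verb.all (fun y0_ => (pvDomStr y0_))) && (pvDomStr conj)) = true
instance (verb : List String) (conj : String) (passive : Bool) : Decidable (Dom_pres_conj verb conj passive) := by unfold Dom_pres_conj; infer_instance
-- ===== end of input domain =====

-- B replaces A's eight branch-specific comprehension blocks with a per-conjugation
-- descriptor table consumed by one uniform loop over the six endings (objective: simpler).

-- ===== PORT A =====
-- literal transliteration of A; unknown conj (Python UnboundLocalError) and short
-- verb lists (IndexError) are excluded by Pre_, the port returns [] / "" there.
def pres_conj (verb : List String) (conj : String) (passive : Bool) : List String :=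
  let pres_act : List String := ["o", "s", "t", "mus", "tis", "nt"]
  let pres_pass : List String := ["r", "ris", "tur", "mur", "mini", "ntur"]
  let v0 := PySem.List.pyGetD verb 0 ""
  let v1 := PySem.List.pyGetD verb 1 ""
  if conj ∈ ["1", "2"] then
    if !passive then
      [v0] ++ (PySem.List.slice pres_act (some 1) none).map
        (fun x => PySem.Str.slice v1 none (some (-2)) ++ x)
    else
      [v0 ++ PySem.List.pyGetD pres_pass 0 ""] ++ (PySem.List.slice pres_pass (some 1) none).map
        (fun x => PySem.Str.slice v1 none (some (-2)) ++ x)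
  else if conj = "3" then
    if !passive then
      [v0] ++ (PySem.List.slice pres_act (some 1) (some 5)).map
        (fun x => PySem.Str.slice v1 none (some (-3)) ++ "i" ++ x)
      ++ [PySem.Str.slice v1 none (some (-3)) ++ "u" ++ PySem.List.pyGetD pres_act 5 ""]
    else
      [v0 ++ PySem.List.pyGetD pres_pass 0 ""]
      ++ [PySem.Str.slice v1 none (some (-3)) ++ "e" ++ PySem.List.pyGetD pres_pass 1 ""]
      ++ (PySem.List.slice pres_pass (some 2) (some 5)).map
        (fun x => PySem.Str.slice v1 none (some (-3)) ++ "i" ++ x)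
      ++ [PySem.Str.slice v1 none (some (-3)) ++ "u" ++ PySem.List.pyGetD pres_pass 5 ""]
  else if conj = "3io" then
    if !passive then
      [v0] ++ (PySem.List.slice pres_act (some 1) (some 5)).map
        (fun x => PySem.Str.slice v1 none (some (-3)) ++ "i" ++ x)
      ++ [PySem.Str.slice v1 none (some (-3)) ++ "iu" ++ PySem.List.pyGetD pres_act 5 ""]
    else
      [v0 ++ PySem.List.pyGetD pres_pass 0 ""]
      ++ [PySem.Str.slice v1 none (some (-3)) ++ "e" ++ PySem.List.pyGetD pres_pass 1 ""]
      ++ (PySem.List.slice pres_pass (some 2) (some 5)).map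
        (fun x => PySem.Str.slice v1 none (some (-3)) ++ "i" ++ x)
      ++ [PySem.Str.slice v1 none (some (-3)) ++ "iu" ++ PySem.List.pyGetD pres_pass 5 ""]
  else if conj = "4" then
    if !passive then
      [v0] ++ (PySem.List.slice pres_act (some 1) (some 5)).map
        (fun x => PySem.Str.slice v1 none (some (-2)) ++ x)
      ++ [PySem.Str.slice v1 none (some (-2)) ++ "u" ++ PySem.List.pyGetD pres_act 5 ""]
    else
      [v0 ++ PySem.List.pyGetD pres_pass 0 ""]
      ++ (PySem.List.slice pres_pass (some 1) (some 5)).map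
        (fun x => PySem.Str.slice v1 none (some (-2)) ++ x)
      ++ [PySem.Str.slice v1 none (some (-2)) ++ "u" ++ PySem.List.pyGetD pres_pass 5 ""]
  else []  -- Python: UnboundLocalError; excluded by Pre_

-- ===== PORT B =====
-- literal transliteration of Source B: descriptor table + one enumerate loop.
def pres_conj_alt (verb : List String) (conj : String) (passive : Bool) : List String :=
  let spec? : Option (Int × List String × List String) :=
    if conj ∈ ["1", "2"] then some (2, List.replicate 6 "", List.replicate 6 "")
    else if conj = "3" then some (3, ["", "i", "i", "i", "i", "u"], ["", "e", "i", "i", "i", "u"])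
    else if conj = "3io" then some (3, ["", "i", "i", "i", "i", "iu"], ["", "e", "i", "i", "i", "iu"])
    else if conj = "4" then some (2, ["", "", "", "", "", "u"], ["", "", "", "", "", "u"])
    else none
  match spec? with
  | none => []  -- Python: UnboundLocalError; excluded by Pre_
  | some (cut, actInf, passInf) =>
    let endings : List String :=
      if passive then ["r", "ris", "tur", "mur", "mini", "ntur"] else ["o", "s", "t", "mus", "tis", "nt"]
    let infixes := if passive then passInf else actInf
    let stem := PySem.Str.slice (PySem.List.pyGetD verb 1 "") none (some (-cut))
    (PySem.List.enumerate endings 0).map (fun p =>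
      if p.1 = 0 then PySem.List.pyGetD verb 0 "" ++ (if passive then "r" else "")
      else stem ++ PySem.List.pyGetD infixes p.1 "" ++ p.2)

-- ===== PRECONDITION & SPEC =====
-- Pre_ excludes exactly the inputs where the Python A raises: verb shorter than 2
-- (IndexError on verb[0]/verb[1]) and a conj outside the four groups (UnboundLocalError).
def Pre_pres_conj (verb : List String) (conj : String) (passive : Bool) : Prop :=
  2 ≤ verb.length ∧ conj ∈ ["1", "2", "3", "3io", "4"]
instance (verb : List String) (conj : String) (passive : Bool) : Decidable (Pre_pres_conj verb conj passive) := by unfold Pre_pres_conj; infer_instance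

def pvWitness_pres_conj : List String × String × Bool := (["amo", "amare"], "1", false)

def Spec_pres_conj (verb : List String) (conj : String) (passive : Bool) (out : List String) : Prop := out = pres_conj_alt verb conj passive
instance (verb : List String) (conj : String) (passive : Bool) (out : List String) : Decidable (Spec_pres_conj verb conj passive out) := by unfold Spec_pres_conj; infer_instance

-- ===== CLAIM (what is proved, stated in full; the proofs are below) =====
def Claim_equal_pres_conj : Prop := ∀ (verb : List String) (conj : String) (passive : Bool), Dom_pres_conj verb conj passive → Pre_pres_conj verb conj passive → Spec_pres_conj verb conj passive (pres_conj verb conj passive)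

-- ===== LEMMAS AND PROOFS =====

-- ===== VERDICT (by name: the statement is the Claim_ definition above) =====
theorem pres_conj_spec : Claim_equal_pres_conj := by
  intro verb conj passive _ hpre
  obtain ⟨_, hconj⟩ := hpre
  unfold Spec_pres_conj pres_conj pres_conj_alt
  simp only [List.mem_cons, List.not_mem_nil, or_false] at hconj
  rcases hconj with h | h | h | h | h <;> subst h <;> cases passive <;>
    simp [PySem.List.enumerate, PySem.List.slice, PySem.List.pyGetD,
          PySem.List.clampIdx, String.append_assoc]
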